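-- pv_equiv track=rewrite | github.com/debusercccp/BioToolKit | bio_logic.py | _is_consistent
-- ===== SOURCE A (Python) =====
-- def get_linear_spectrum(peptide_masses: list[int]) -> list[int]:
--     """Theoretical linear spectrum for a peptide given as a list of residue masses."""
--     prefix = [0]
--     for m in peptide_masses:
--         prefix.append(prefix[-1] + m)
--     return sorted(
--         prefix[j] - prefix[i]
--         for i in range(len(prefix))
--         for j in range(i + 1, len(prefix))
--     )
--
-- def _is_consistent(peptide_masses: list[int], experimental_spectrum: list[int]) -> bool:
--     """True if the linear spectrum of *peptide_masses* is a sub-multiset of *experimental_spectrum*."""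
--     remaining = list(experimental_spectrum)
--     for mass in get_linear_spectrum(peptide_masses):
--         try:
--             remaining.remove(mass)
--         except ValueError:
--             return False
--     return True
-- ===== SOURCE B (Python) =====
-- def _is_consistent(peptide_masses: list[int], experimental_spectrum: list[int]) -> bool:
--     """True if the linear spectrum of *peptide_masses* is a sub-multiset of *experimental_spectrum*."""
--     n = len(peptide_masses)
--     windows = []
--     for i in range(n):
--         s = 0
--         for j in range(i, n):
--             s += peptide_masses[j]
--             windows.append(s)
--     windows.sort()
--     exp = sorted(experimental_spectrum)
--     i = 0
--     for w in windows:
--         while i < len(exp) and exp[i] < w: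
--             i += 1
--         if i == len(exp) or exp[i] != w:
--             return False
--         i += 1
--     return True
-- ===== Notes on version B (the rewrite author's own statement) =====
-- stated objective: alternative
-- what changed: Replaced the prefix-sum table + destructive list.remove loop (each remove scans the remaining experimental list) by running-sum window generation followed by sorting both multisets once and a single two-pointer merge scan that decides sub-multiset containment.
import Mathlib
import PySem

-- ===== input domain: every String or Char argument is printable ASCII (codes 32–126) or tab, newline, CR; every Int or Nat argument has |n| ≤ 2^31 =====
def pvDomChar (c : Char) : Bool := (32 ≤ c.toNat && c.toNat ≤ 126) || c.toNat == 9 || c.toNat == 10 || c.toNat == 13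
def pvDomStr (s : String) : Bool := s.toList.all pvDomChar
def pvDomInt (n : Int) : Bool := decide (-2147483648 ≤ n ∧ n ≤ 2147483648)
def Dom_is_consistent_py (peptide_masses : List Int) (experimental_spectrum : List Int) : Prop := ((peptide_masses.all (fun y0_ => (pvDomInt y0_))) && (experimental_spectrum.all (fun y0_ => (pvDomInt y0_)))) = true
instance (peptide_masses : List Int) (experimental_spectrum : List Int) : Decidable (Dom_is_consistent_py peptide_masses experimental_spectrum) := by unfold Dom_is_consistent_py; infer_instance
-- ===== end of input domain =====

-- B replaces A's prefix-sum table + destructive list.remove loop by running-sum window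
-- generation, sorting both lists once, and a single two-pointer merge scan (objective: alternative).
-- Neither implementation mutates its arguments.

-- ===== PORT A =====
-- A's 'for mass in …: try remaining.remove(mass) except ValueError: return False' loop.
def isConsLoop : List Int → List Int → Bool
  | [], _ => true
  | mass :: rest, remaining =>
    match PySem.List.remove? remaining mass with
    | none => false
    | some r => isConsLoop rest r

def is_consistent_py (peptide_masses : List Int) (experimental_spectrum : List Int) : Bool :=
  -- get_linear_spectrum, inlined: prefix table, generator of pairwise differences, sorted().
  -- prefix[-1] is ported as pyGetD … (-1) 0: the prefix list always ends with the running sum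
  -- (it starts as [0] and only grows), so Python's prefix[-1] never raises and pyGetD is exact.
  let pfx := peptide_masses.foldl (fun p m => p ++ [PySem.List.pyGetD p (-1) 0 + m]) [0]
  -- prefix[j] / prefix[i] with 0 ≤ i < j < len(prefix): always in range, pyGetD is exact.
  let diffs := (PySem.List.pyRange 0 (pfx.length : Int) 1).flatMap (fun i =>
      (PySem.List.pyRange (i + 1) (pfx.length : Int) 1).map (fun j =>
        PySem.List.pyGetD pfx j 0 - PySem.List.pyGetD pfx i 0))
  let spectrum := PySem.List.sorted diffs (fun x => x) false
  isConsLoop spectrum experimental_spectrum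

-- ===== PORT B =====
-- B's 'while i < len(exp) and exp[i] < w: i += 1' loop, as the suffix of exp from index i.
def skipLt (w : Int) : List Int → List Int
  | [] => []
  | x :: rest => if x < w then skipLt w rest else x :: rest

-- B's 'for w in windows' loop over the sorted windows, carrying the exp suffix.
def mergeCheck : List Int → List Int → Bool
  | [], _ => true
  | w :: ws, e =>
    match skipLt w e with
    | [] => false                                        -- i == len(exp)
    | x :: rest => if x == w then mergeCheck ws rest else false

def is_consistent_py_alt (peptide_masses : List Int) (experimental_spectrum : List Int) : Bool :=
  let n := (peptide_masses.length : Int)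
  -- nested index loops building the running-sum windows list
  let windows := (PySem.List.pyRange 0 n 1).foldl (fun acc i =>
      ((PySem.List.pyRange i n 1).foldl
        (fun (p : List Int × Int) j =>
          let s := p.2 + PySem.List.pyGetD peptide_masses j 0
          (p.1 ++ [s], s)) (acc, (0 : Int))).1) []
  mergeCheck (PySem.List.sorted windows (fun x => x) false)
             (PySem.List.sorted experimental_spectrum (fun x => x) false)

-- ===== PRECONDITION & SPEC =====
def Spec_is_consistent_py (peptide_masses : List Int) (experimental_spectrum : List Int) (out : Bool) : Prop := out = is_consistent_py_alt peptide_masses experimental_spectrum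
instance (peptide_masses : List Int) (experimental_spectrum : List Int) (out : Bool) : Decidable (Spec_is_consistent_py peptide_masses experimental_spectrum out) := by unfold Spec_is_consistent_py; infer_instance

-- ===== CLAIM (what is proved, stated in full; the proofs are below) =====
def Claim_equal_is_consistent_py : Prop := ∀ (peptide_masses : List Int) (experimental_spectrum : List Int), Dom_is_consistent_py peptide_masses experimental_spectrum → Spec_is_consistent_py peptide_masses experimental_spectrum (is_consistent_py peptide_masses experimental_spectrum)

-- ===== LEMMAS AND PROOFS =====

-- the prefix-sum list [s, s+l0, s+l0+l1, …]
def pscan (s : Int) : List Int → List Int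
  | [] => [s]
  | m :: rest => s :: pscan (s + m) rest

-- running sums [s+l0, s+l0+l1, …]
def runsums (s : Int) : List Int → List Int
  | [] => []
  | m :: rest => (s + m) :: runsums (s + m) rest

-- all contiguous window sums, outer index first (B's generation order)
def wnd : List Int → List Int
  | [] => []
  | m :: rest => runsums 0 (m :: rest) ++ wnd rest

-- the pairwise-difference list of a prefix table, structurally
def dtab : List Int → List Int
  | [] => []
  | p :: P => P.map (fun x => x - p) ++ dtab P

theorem cons_subperm_iff_erase {m : Int} {l r : List Int} (h : m ∈ r) :
    List.Subperm (m :: l) r ↔ List.Subperm l (r.erase m) := by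
  rw [(List.perm_cons_erase h).subperm_left, List.subperm_cons]

theorem isConsLoop_iff_subperm (ws r : List Int) :
    isConsLoop ws r = true ↔ List.Subperm ws r := by
  induction ws generalizing r with
  | nil => simp [isConsLoop]
  | cons m ws ih =>
    simp only [isConsLoop]
    by_cases hm : m ∈ r
    · rw [PySem.List.remove?_eq_some_erase r m hm, cons_subperm_iff_erase hm]
      exact ih _
    · rw [(PySem.List.remove?_eq_none_iff r m).mpr hm]
      constructor
      · intro hfalse; exact absurd hfalse (by simp)
      · intro hsub; exact absurd (hsub.subset List.mem_cons_self) hm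

theorem prefix_foldl_eq_pscan (l : List Int) (acc : List Int) (s : Int) :
    l.foldl (fun p m => p ++ [PySem.List.pyGetD p (-1) 0 + m]) (acc ++ [s]) = acc ++ pscan s l := by
  induction l generalizing acc s with
  | nil => simp [pscan]
  | cons m l ih =>
    simp only [List.foldl_cons, PySem.List.pyGetD_neg_one_append_singleton, pscan]
    rw [show acc ++ [s] ++ [s + m] = (acc ++ [s]) ++ [s + m] by simp, ih]
    simp

theorem map_sub_pscan (l : List Int) (t s : Int) :
    (pscan t l).map (fun x => x - s) = (t - s) :: runsums (t - s) l := by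
  induction l generalizing t with
  | nil => simp [pscan, runsums]
  | cons m l ih =>
    simp only [pscan, List.map_cons, runsums, ih (t + m)]
    rw [show t + m - s = t - s + m by ring]

theorem dtab_pscan (l : List Int) (s : Int) : dtab (pscan s l) = wnd l := by
  induction l generalizing s with
  | nil => simp [pscan, dtab, wnd]
  | cons m l ih =>
    simp only [pscan, dtab, map_sub_pscan, ih (s + m), wnd, runsums]
    rw [show s + m - s = 0 + m by ring]

theorem flatMap_drop_eq_dtab (P : List Int) :
    (List.range P.length).flatMap
      (fun k => (P.drop (k + 1)).map (fun x => x - P.getD k 0)) = dtab P := by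
  induction P with
  | nil => simp [dtab]
  | cons p P ih =>
    rw [List.length_cons, List.range_succ_eq_map, List.flatMap_cons, List.flatMap_map]
    simp only [List.drop_succ_cons, List.getD_cons_succ, List.getD_cons_zero,
      dtab]
    rw [List.drop_zero, ih]

theorem diffs_eq_wnd (masses : List Int) :
    ((PySem.List.pyRange 0 ((pscan 0 masses).length : Int) 1).flatMap (fun i =>
      (PySem.List.pyRange (i + 1) ((pscan 0 masses).length : Int) 1).map (fun j =>
        PySem.List.pyGetD (pscan 0 masses) j 0 - PySem.List.pyGetD (pscan 0 masses) i 0)))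
    = wnd masses := by
  rw [← dtab_pscan masses 0]
  generalize pscan 0 masses = P
  rw [PySem.List.pyRange_zero_natCast, List.flatMap_map]
  rw [show (fun (k : Nat) => (PySem.List.pyRange ((k : Int) + 1) (P.length : Int) 1).map (fun j =>
        PySem.List.pyGetD P j 0 - PySem.List.pyGetD P (k : Int) 0))
      = fun (k : Nat) => (P.drop (k + 1)).map (fun x => x - P.getD k 0) from funext (fun k => by
    rw [PySem.List.pyGetD_natCast]
    calc (PySem.List.pyRange ((k : Int) + 1) (P.length : Int) 1).map (fun j =>
          PySem.List.pyGetD P j 0 - P.getD k 0)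
        = ((PySem.List.pyRange ((k : Int) + 1) (P.length : Int) 1).map (fun j =>
            PySem.List.pyGetD P j 0)).map (fun x => x - P.getD k 0) := by rw [List.map_map]; rfl
      _ = (P.drop ((k : Int) + 1).toNat).map (fun x => x - P.getD k 0) := by
            rw [PySem.List.map_pyGetD_pyRange' P 0 (by omega)]
      _ = (P.drop (k + 1)).map (fun x => x - P.getD k 0) := by norm_num)]
  exact flatMap_drop_eq_dtab P

-- B's inner fold produces acc ++ running sums
theorem inner_foldl_eq_runsums (l : List Int) (acc : List Int) (s : Int) :
    (l.foldl (fun (p : List Int × Int) m => (p.1 ++ [p.2 + m], p.2 + m)) (acc, s)).1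
      = acc ++ runsums s l := by
  induction l generalizing acc s with
  | nil => simp [runsums]
  | cons m l ih => simp [runsums, ih]

theorem range_foldl_eq_wnd (l : List Int) (acc : List Int) :
    (List.range l.length).foldl (fun acc k => acc ++ runsums 0 (l.drop k)) acc
      = acc ++ wnd l := by
  induction l generalizing acc with
  | nil => simp [wnd]
  | cons m l ih =>
    rw [List.length_cons, List.range_succ_eq_map, List.foldl_cons, List.foldl_map]
    simp only [List.drop_succ_cons, List.drop_zero]
    rw [ih, wnd, List.append_assoc]

theorem skipLt_sublist (w : Int) (l : List Int) : (skipLt w l).Sublist l := by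
  induction l with
  | nil => simp [skipLt]
  | cons x rest ih =>
    simp only [skipLt]
    split
    · exact ih.trans (List.sublist_cons_self x rest)
    · exact List.Sublist.refl _

theorem count_skipLt (w x : Int) (hx : w ≤ x) (l : List Int) :
    (skipLt w l).count x = l.count x := by
  induction l with
  | nil => rfl
  | cons y rest ih =>
    simp only [skipLt]
    split
    · rename_i hy
      rw [ih, List.count_cons_of_ne (by omega)]
    · rfl

theorem subperm_skipLt (w : Int) (a b : List Int) (ha : ∀ x ∈ a, w ≤ x) :
    List.Subperm a b ↔ List.Subperm a (skipLt w b) := by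
  rw [List.subperm_ext_iff, List.subperm_ext_iff]
  constructor
  · intro h x hx; rw [count_skipLt w x (ha x hx)]; exact h x hx
  · intro h x hx; have := h x hx; rwa [count_skipLt w x (ha x hx) b] at this

theorem skipLt_head_not_lt (w : Int) : ∀ (l : List Int) {x : Int} {rest : List Int},
    skipLt w l = x :: rest → ¬ x < w
  | [], x, rest, h => by simp [skipLt] at h
  | z :: zs, x, rest, h => by
      by_cases hz : z < w
      · rw [skipLt, if_pos hz] at h
        exact skipLt_head_not_lt w zs h
      · rw [skipLt, if_neg hz] at h
        injection h with h1 _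
        subst h1
        exact hz

theorem mergeCheck_iff_subperm (a b : List Int)
    (ha : a.Pairwise (· ≤ ·)) (hb : b.Pairwise (· ≤ ·)) :
    mergeCheck a b = true ↔ List.Subperm a b := by
  induction a generalizing b with
  | nil => simp [mergeCheck]
  | cons w ws ih =>
    have hwle : ∀ x ∈ w :: ws, w ≤ x := by
      intro x hx
      rcases List.mem_cons.mp hx with h | h
      · exact le_of_eq h.symm
      · exact (List.pairwise_cons.mp ha).1 x h
    rw [subperm_skipLt w (w :: ws) b hwle]
    have hskip : (skipLt w b).Pairwise (· ≤ ·) := hb.sublist (skipLt_sublist w b)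
    simp only [mergeCheck]
    cases hs : skipLt w b with
    | nil =>
      show false = true ↔ List.Subperm (w :: ws) []
      simp only [Bool.false_eq_true, false_iff]
      intro hsub
      exact absurd (hsub.subset List.mem_cons_self) (by simp)
    | cons x rest =>
      have hxw : ¬ x < w := skipLt_head_not_lt w b hs
      rw [hs] at hskip
      show (if (x == w) = true then mergeCheck ws rest else false) = true
        ↔ List.Subperm (w :: ws) (x :: rest)
      by_cases hxeq : x = w
      · subst hxeq
        simp only [beq_self_eq_true, if_true]
        rw [List.subperm_cons]
        exact ih rest (List.pairwise_cons.mp ha).2 (List.pairwise_cons.mp hskip).2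
      · have hbe : (x == w) = false := beq_eq_false_iff_ne.mpr hxeq
        rw [hbe]
        simp only [Bool.false_eq_true, if_false, false_iff]
        intro hsub
        have hw : w ∈ x :: rest := hsub.subset List.mem_cons_self
        rcases List.mem_cons.mp hw with h | h
        · exact hxeq h.symm
        · have := (List.pairwise_cons.mp hskip).1 w h
          omega

-- ===== VERDICT (by name: the statement is the Claim_ definition above) =====
theorem is_consistent_py_spec : Claim_equal_is_consistent_py := by
  intro masses exp _
  show is_consistent_py masses exp = is_consistent_py_alt masses exp
  unfold is_consistent_py is_consistent_py_alt
  rw [show ([0] : List Int) = [] ++ [0] from rfl, prefix_foldl_eq_pscan, List.nil_append]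
  simp only
  rw [diffs_eq_wnd]
  -- B's windows list is wnd masses
  have hwin : (PySem.List.pyRange 0 ((masses.length : Int)) 1).foldl (fun acc i =>
      ((PySem.List.pyRange i ((masses.length : Int)) 1).foldl
        (fun (p : List Int × Int) j =>
          (p.1 ++ [p.2 + PySem.List.pyGetD masses j 0], p.2 + PySem.List.pyGetD masses j 0))
        (acc, (0 : Int))).1) [] = wnd masses := by
    rw [PySem.List.pyRange_zero_natCast, List.foldl_map]
    refine Eq.trans (List.foldl_ext _ (fun acc k => acc ++ runsums 0 (masses.drop k)) [] ?_) ?_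
    · intro acc k _
      rw [PySem.List.foldl_pyRange_pyGetD' masses 0
        (fun (p : List Int × Int) m => (p.1 ++ [p.2 + m], p.2 + m)) (acc, 0)
        (a := (k : Int)) (Int.natCast_nonneg k)]
      rw [inner_foldl_eq_runsums]
      norm_num
    · rw [range_foldl_eq_wnd]; simp
  rw [hwin]
  rw [Bool.eq_iff_iff, isConsLoop_iff_subperm,
    mergeCheck_iff_subperm _ _
      (by simpa using PySem.List.sorted_pairwise (wnd masses) (fun x => x))
      (by simpa using PySem.List.sorted_pairwise exp (fun x => x))]
  exact ((PySem.List.sorted_perm exp (fun x => x) false).subperm_left).symm
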